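-- pv_equiv track=rewrite | github.com/MrBrantCode/unitest_baseline | mut_generate/mist_train_taco/taco_5085/solution.py | count_fibonacci_numbers
-- ===== SOURCE A (Python) =====
-- def count_fibonacci_numbers(arr, N):
--     # Find the maximum number in the array to limit the Fibonacci sequence generation
--     max_num = max(arr)
--
--     # Initialize the list to store Fibonacci numbers
--     fib_numbers = [0, 1]
--
--     # Generate Fibonacci numbers until the maximum number in the array
--     i = 2
--     while True:
--         next_fib = fib_numbers[i - 1] + fib_numbers[i - 2]
--         if next_fib > max_num:
--             break
--         fib_numbers.append(next_fib)
--         i += 1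
--
--     # Count the Fibonacci numbers in the array
--     fib_count = 0
--     for num in arr:
--         if num in fib_numbers:
--             fib_count += 1
--
--     return fib_count
-- ===== SOURCE B (Python) =====
-- def count_fibonacci_numbers(arr, N):
--     # Per-element Fibonacci test: walk the Fibonacci pair until it reaches n,
--     # no table of Fibonacci numbers is ever built (and max(arr) is not needed).
--     def is_fib(n):
--         a, b = 0, 1
--         while b < n:
--             a, b = b, a + b
--         return n == a or n == b
--
--     return sum(1 for num in arr if is_fib(num))
-- ===== Notes on version B (the rewrite author's own statement) =====
-- stated objective: simpler
-- what changed: B drops the build-a-Fibonacci-table-then-list-membership structure entirely: it tests each element directly by walking the Fibonacci pair (a,b) up to that element, so no max(arr) and no list are computed.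
import Mathlib
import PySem

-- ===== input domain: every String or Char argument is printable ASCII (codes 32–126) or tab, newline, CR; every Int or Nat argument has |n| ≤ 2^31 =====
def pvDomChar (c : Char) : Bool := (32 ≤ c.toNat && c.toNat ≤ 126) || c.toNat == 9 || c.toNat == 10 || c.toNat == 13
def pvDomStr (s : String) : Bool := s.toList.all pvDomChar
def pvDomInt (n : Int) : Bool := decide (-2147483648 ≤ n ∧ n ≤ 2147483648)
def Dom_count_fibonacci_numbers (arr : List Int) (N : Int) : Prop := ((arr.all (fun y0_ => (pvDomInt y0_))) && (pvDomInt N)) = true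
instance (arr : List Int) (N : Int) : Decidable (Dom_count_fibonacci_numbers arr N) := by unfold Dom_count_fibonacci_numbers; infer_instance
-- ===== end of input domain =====

-- B replaces A's build-a-Fibonacci-table-then-membership-scan with a per-element
-- Fibonacci pair walk (no table, no max(arr)): objective 'simpler'.

-- ===== PORT A =====
-- A's while loop appends next_fib = fib_numbers[i-1] + fib_numbers[i-2] while it is ≤ max_num;
-- the last two appended values are carried as (a, b); the proof arguments only serve termination.
def pvGenFib (m a b : Int) (ha : 0 ≤ a) (hab : a ≤ b) (hb : 1 ≤ b) : List Int :=
  if h : a + b > m then []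
  else (a + b) :: pvGenFib m b (a + b) (by omega) (by omega) (by omega)
termination_by (m + 2 - (a + b)).toNat
decreasing_by omega

def count_fibonacci_numbers (arr : List Int) (N : Int) : Int :=
  match PySem.List.max? arr (fun x => x) with
  | none => 0   -- unreachable under Pre_ (Python's max raises ValueError on an empty arr)
  | some maxNum =>
    let fibNumbers : List Int :=
      0 :: 1 :: pvGenFib maxNum 0 1 (by decide) (by decide) (by decide)
    arr.foldl (fun fibCount num => if num ∈ fibNumbers then fibCount + 1 else fibCount) 0

-- ===== PORT B =====
-- B's inner while loop of is_fib; the proof arguments only serve termination.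
def pvIsFibLoop (n a b : Int) (ha : 0 ≤ a) (hab : a ≤ b) (hb : 1 ≤ b) : Bool :=
  if h : b < n then pvIsFibLoop n b (a + b) (by omega) (by omega) (by omega)
  else (n == a || n == b)
termination_by (2 * n - (a + b)).toNat
decreasing_by omega

def count_fibonacci_numbers_alt (arr : List Int) (N : Int) : Int :=
  arr.foldl
    (fun acc num =>
      if pvIsFibLoop num 0 1 (by decide) (by decide) (by decide) then acc + 1 else acc) 0

-- ===== PRECONDITION & SPEC =====
-- Python's max(arr) raises ValueError on an empty list, so A only returns for nonempty arr.
def Pre_count_fibonacci_numbers (arr : List Int) (N : Int) : Prop := arr ≠ []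
instance (arr : List Int) (N : Int) : Decidable (Pre_count_fibonacci_numbers arr N) := by
  unfold Pre_count_fibonacci_numbers; infer_instance

def pvWitness_count_fibonacci_numbers : List Int × Int := ([0, 4, 5, 8, -3], 5)

def Spec_count_fibonacci_numbers (arr : List Int) (N : Int) (out : Int) : Prop := out = count_fibonacci_numbers_alt arr N
instance (arr : List Int) (N : Int) (out : Int) : Decidable (Spec_count_fibonacci_numbers arr N out) := by unfold Spec_count_fibonacci_numbers; infer_instance

-- ===== CLAIM (what is proved, stated in full; the proofs are below) =====
def Claim_equal_count_fibonacci_numbers : Prop := ∀ (arr : List Int) (N : Int), Dom_count_fibonacci_numbers arr N → Pre_count_fibonacci_numbers arr N → Spec_count_fibonacci_numbers arr N (count_fibonacci_numbers arr N)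

-- ===== LEMMAS AND PROOFS =====

-- Every element of A's generated tail is at least a + b.
lemma pvGenFib_lower (m a b : Int) (ha : 0 ≤ a) (hab : a ≤ b) (hb : 1 ≤ b) :
    ∀ x ∈ pvGenFib m a b ha hab hb, a + b ≤ x := by
  fun_induction pvGenFib m a b ha hab hb with
  | case1 => simp
  | case2 a b ha hab hb h ih =>
    intro x hx
    rcases List.mem_cons.mp hx with h1 | h2
    · omega
    · have := ih x h2; omega

-- When the chain has passed m, B's walk answers exactly "n = a ∨ n = b".
lemma pvIsFibLoop_big (m n a b : Int) (ha : 0 ≤ a) (hab : a ≤ b) (hb : 1 ≤ b)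
    (hbig : a + b > m) (hn : n ≤ m) :
    (pvIsFibLoop n a b ha hab hb = true) ↔ (n = a ∨ n = b) := by
  rw [pvIsFibLoop]
  split
  · rename_i hlt
    rw [pvIsFibLoop]
    have h2 : ¬ (a + b < n) := by omega
    rw [dif_neg h2]
    constructor
    · intro h
      simp only [Bool.or_eq_true, beq_iff_eq] at h
      omega
    · intro h; omega
  · rename_i hge
    simp [beq_iff_eq]

-- Core correspondence: membership in A's fib chain from (a,b) equals B's pair walk.
lemma pvChain_aux (m : Int) (k : ℕ) :
    ∀ (a b n : Int) (ha : 0 ≤ a) (hab : a ≤ b) (hb : 1 ≤ b),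
      (m + 2 - (a + b)).toNat ≤ k → n ≤ m →
      ((n = a ∨ n = b ∨ n ∈ pvGenFib m a b ha hab hb) ↔ pvIsFibLoop n a b ha hab hb = true) := by
  induction k with
  | zero =>
    intro a b n ha hab hb hk hn
    have hbig : a + b > m := by omega
    rw [pvGenFib, dif_pos hbig, pvIsFibLoop_big m n a b ha hab hb hbig hn]
    simp
  | succ k ih =>
    intro a b n ha hab hb hk hn
    by_cases hbig : a + b > m
    · rw [pvGenFib, dif_pos hbig, pvIsFibLoop_big m n a b ha hab hb hbig hn]
      simp
    · rw [pvGenFib, dif_neg hbig]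
      rw [pvIsFibLoop]
      split
      · rename_i hlt
        have := ih b (a + b) n (by omega) (by omega) (by omega) (by omega) hn
        rw [← this]
        constructor
        · rintro (h | h | h)
          · omega
          · exact Or.inl h
          · rcases List.mem_cons.mp h with h1 | h2
            · exact Or.inr (Or.inl h1)
            · exact Or.inr (Or.inr h2)
        · rintro (h | h | h)
          · exact Or.inr (Or.inl h)
          · exact Or.inr (Or.inr (List.mem_cons.mpr (Or.inl h)))
          · exact Or.inr (Or.inr (List.mem_cons.mpr (Or.inr h)))
      · rename_i hge
        constructor
        · rintro (h | h | h)
          · simp [beq_iff_eq]; omega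
          · simp [beq_iff_eq]; omega
          · rcases List.mem_cons.mp h with h1 | h2
            · simp [beq_iff_eq]; omega
            · have := pvGenFib_lower m b (a + b) (by omega) (by omega) (by omega) n h2
              omega
        · intro h
          simp only [Bool.or_eq_true, beq_iff_eq] at h
          omega

lemma pvChain_iff (m a b n : Int) (ha : 0 ≤ a) (hab : a ≤ b) (hb : 1 ≤ b) (hn : n ≤ m) :
    (n = a ∨ n = b ∨ n ∈ pvGenFib m a b ha hab hb) ↔ pvIsFibLoop n a b ha hab hb = true :=
  pvChain_aux m (m + 2 - (a + b)).toNat a b n ha hab hb le_rfl hn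

-- ===== VERDICT (by name: the statement is the Claim_ definition above) =====
theorem count_fibonacci_numbers_spec : Claim_equal_count_fibonacci_numbers := by
  intro arr N _ hpre
  unfold Spec_count_fibonacci_numbers count_fibonacci_numbers count_fibonacci_numbers_alt
  cases hmax : PySem.List.max? arr (fun x => x) with
  | none => exact absurd ((PySem.List.max?_eq_none_iff arr (fun x => x)).mp hmax) hpre
  | some maxNum =>
    simp only []
    apply PySem.List.foldl_congr_mem
    intro acc num hnum
    have hle : num ≤ maxNum := PySem.List.max?_isMax hmax num hnum
    have hiff := pvChain_iff maxNum 0 1 num (by decide) (by decide) (by decide) hle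
    by_cases hmem : num ∈ (0 : Int) :: 1 :: pvGenFib maxNum 0 1 (by decide) (by decide) (by decide)
    · have : pvIsFibLoop num 0 1 (by decide) (by decide) (by decide) = true := by
        apply hiff.mp; simpa using hmem
      simp [hmem, this]
    · have : ¬ pvIsFibLoop num 0 1 (by decide) (by decide) (by decide) = true := by
        intro h
        exact hmem (by simpa using hiff.mpr h)
      simp [hmem, this]
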